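-- pv_equiv track=rewrite | github.com/tracyphasespace/Quantum-Field-Dynamics | archive/LaGrangianSolitons_deprecated/shell_weighted_vortex_shielding.py | get_shell_structure
-- ===== SOURCE A (Python) =====
-- SHELL_CLOSURES = {
--     # K shell (n=1)
--     2: ('K', 1),
--     # L shell (n=2)
--     10: ('L', 2),
--     # M shell (n=3)
--     18: ('M', 3),
--     28: ('M', 3),  # 3d subshell
--     # N shell (n=4)
--     36: ('N', 4),
--     48: ('N', 4),  # 4d subshell
--     # O shell (n=5)
--     54: ('O', 5),
--     70: ('O', 5),  # 4f subshell
--     # P shell (n=6)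
--     86: ('P', 6),
-- }
--
-- def get_shell_structure(Z):
--     """
--     Determine shell occupancy for atom with Z protons/electrons.
--
--     Returns: list of (n_shell, electrons_in_shell) tuples
--     """
--     shells = []
--
--     # Simplified: assign electrons to shells based on closures
--     shell_edges = sorted(SHELL_CLOSURES.keys())
--
--     Z_remaining = Z
--     prev_Z = 0
--
--     for Z_closure in shell_edges:
--         if Z <= Z_closure:
--             # Partially filled shell
--             shell_name, n = SHELL_CLOSURES[Z_closure]
--             electrons_in_shell = Z_remaining
--             if electrons_in_shell > 0:
--                 shells.append((n, electrons_in_shell))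
--             break
--         else:
--             # Filled shell
--             shell_name, n = SHELL_CLOSURES[Z_closure]
--             electrons_in_shell = Z_closure - prev_Z
--             shells.append((n, electrons_in_shell))
--             Z_remaining -= electrons_in_shell
--             prev_Z = Z_closure
--
--     # Any remaining electrons in outermost shell
--     if Z > shell_edges[-1]:
--         # Beyond Z=86, assume high n
--         n = 7  # Q shell
--         shells.append((n, Z_remaining))
--
--     return shells
-- ===== SOURCE B (Python) =====
-- EDGES = [2, 10, 18, 28, 36, 48, 54, 70, 86]
-- N_OF = {2: 1, 10: 2, 18: 3, 28: 3, 36: 4, 48: 4, 54: 5, 70: 5, 86: 6}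
--
-- def get_shell_structure(Z):
--     # Boundary list: 0, every closure edge strictly below Z, then Z itself.
--     # Each adjacent pair (lo, hi) is one occupied segment of hi - lo electrons,
--     # labelled by the n of the first edge at or above hi (7 beyond the table).
--     if Z <= 0:
--         return []
--     bounds = [0] + [e for e in EDGES if e < Z] + [Z]
--     return [(next((N_OF[e] for e in EDGES if e >= hi), 7), hi - lo)
--             for lo, hi in zip(bounds, bounds[1:])]
-- ===== Notes on version B (the rewrite author's own statement) =====
-- stated objective: alternative
-- what changed: Replaced A's stateful loop (Z_remaining/prev_Z accumulators with an early break and a post-loop tail) by a boundary-list construction: collect 0, the closure edges below Z, and Z itself, then map pairwise differences of adjacent boundaries, labelling each segment by a forward search for the first edge at or above its upper boundary (7 if none).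
import Mathlib
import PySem

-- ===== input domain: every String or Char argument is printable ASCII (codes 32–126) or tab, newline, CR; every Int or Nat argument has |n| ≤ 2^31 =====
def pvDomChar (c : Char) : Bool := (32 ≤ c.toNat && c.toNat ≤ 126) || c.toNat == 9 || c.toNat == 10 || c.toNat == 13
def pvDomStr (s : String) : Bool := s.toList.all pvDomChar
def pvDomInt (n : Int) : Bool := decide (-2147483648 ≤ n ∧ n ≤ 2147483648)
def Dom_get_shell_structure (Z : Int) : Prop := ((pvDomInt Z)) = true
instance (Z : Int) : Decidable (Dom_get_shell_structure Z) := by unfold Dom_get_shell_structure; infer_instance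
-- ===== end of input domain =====

-- B replaces A's stateful loop-with-break by a boundary list (0, edges below Z, Z) mapped
-- through pairwise differences with a forward label search; objective: alternative, same cost.

-- ===== PORT A =====
def shellEdges : List Int := [2, 10, 18, 28, 36, 48, 54, 70, 86]

-- SHELL_CLOSURES as an association list edge ↦ n (the shell name is unused)
def shellClosuresN : List (Int × Int) :=
  [(2, 1), (10, 2), (18, 3), (28, 3), (36, 4), (48, 4), (54, 5), (70, 5), (86, 6)]

def lookupN (e : Int) : Int := ((shellClosuresN.lookup e).getD 0)

-- the for-loop with its break: state (shells, Z_remaining, prev_Z)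
def shellLoop (Z : Int) : List Int → List (Int × Int) → Int → Int → (List (Int × Int) × Int)
  | [], shells, zRem, _ => (shells, zRem)
  | e :: rest, shells, zRem, prevZ =>
      if Z ≤ e then
        (if zRem > 0 then shells ++ [(lookupN e, zRem)] else shells, zRem)
      else
        shellLoop Z rest (shells ++ [(lookupN e, e - prevZ)]) (zRem - (e - prevZ)) e

def get_shell_structure (Z : Int) : List (Int × Int) :=
  let r := shellLoop Z shellEdges [] Z 0
  if Z > 86 then r.1 ++ [(7, r.2)] else r.1

-- ===== PORT B =====
def edgesB : List Int := [2, 10, 18, 28, 36, 48, 54, 70, 86]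

def nOfB : List (Int × Int) :=
  [(2, 1), (10, 2), (18, 3), (28, 3), (36, 4), (48, 4), (54, 5), (70, 5), (86, 6)]

-- next((N_OF[e] for e in EDGES if e >= hi), 7)
def labelB (hi : Int) : Int :=
  match edgesB.find? (fun e => decide (hi ≤ e)) with
  | some e => (nOfB.lookup e).getD 0
  | none => 7

def get_shell_structure_alt (Z : Int) : List (Int × Int) :=
  if Z ≤ 0 then []
  else
    let bounds := 0 :: (edgesB.filter (fun e => decide (e < Z)) ++ [Z])
    (bounds.zip bounds.tail).map (fun p => (labelB p.2, p.2 - p.1))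

-- ===== PRECONDITION & SPEC =====
def Spec_get_shell_structure (Z : Int) (out : List (Int × Int)) : Prop := out = get_shell_structure_alt Z
instance (Z : Int) (out : List (Int × Int)) : Decidable (Spec_get_shell_structure Z out) := by unfold Spec_get_shell_structure; infer_instance

-- ===== CLAIM (what is proved, stated in full; the proofs are below) =====
def Claim_equal_get_shell_structure : Prop := ∀ (Z : Int), Dom_get_shell_structure Z → Spec_get_shell_structure Z (get_shell_structure Z)

-- ===== LEMMAS AND PROOFS =====
theorem lk2 : lookupN 2 = 1 := by decide

theorem lb2 : labelB 2 = 1 := by decide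

theorem lk10 : lookupN 10 = 2 := by decide

theorem lb10 : labelB 10 = 2 := by decide

theorem lk18 : lookupN 18 = 3 := by decide

theorem lb18 : labelB 18 = 3 := by decide

theorem lk28 : lookupN 28 = 3 := by decide

theorem lb28 : labelB 28 = 3 := by decide

theorem lk36 : lookupN 36 = 4 := by decide

theorem lb36 : labelB 36 = 4 := by decide

theorem lk48 : lookupN 48 = 4 := by decide

theorem lb48 : labelB 48 = 4 := by decide

theorem lk54 : lookupN 54 = 5 := by decide

theorem lb54 : labelB 54 = 5 := by decide

theorem lk70 : lookupN 70 = 5 := by decide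

theorem lb70 : labelB 70 = 5 := by decide

theorem lk86 : lookupN 86 = 6 := by decide

theorem lb86 : labelB 86 = 6 := by decide



theorem filt0 (Z : Int) (h1 : 0 < Z) (h2 : Z ≤ 2) :
    edgesB.filter (fun e => decide (e < Z)) = [] := by
  simp only [edgesB, List.filter,
    show decide ((2:Int) < Z) = false by simp; omega,
    show decide ((10:Int) < Z) = false by simp; omega,
    show decide ((18:Int) < Z) = false by simp; omega,
    show decide ((28:Int) < Z) = false by simp; omega,
    show decide ((36:Int) < Z) = false by simp; omega,
    show decide ((48:Int) < Z) = false by simp; omega,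
    show decide ((54:Int) < Z) = false by simp; omega,
    show decide ((70:Int) < Z) = false by simp; omega,
    show decide ((86:Int) < Z) = false by simp; omega]

theorem lbl0 (Z : Int) (h1 : 0 < Z) (h2 : Z ≤ 2) : labelB Z = 1 := by
  simp only [labelB, edgesB, nOfB, List.find?,
    show decide (Z ≤ (2:Int)) = true by simp; omega]
  decide

theorem alt0 (Z : Int) (h1 : 0 < Z) (h2 : Z ≤ 2) :
    get_shell_structure_alt Z = [(1, Z - 0)] := by
  simp only [get_shell_structure_alt, filt0 Z h1 h2, if_neg (show ¬ Z ≤ 0 by omega),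
    List.cons_append, List.nil_append, List.zip, List.zipWith, List.tail, List.map,
    lbl0 Z h1 h2]
  try norm_num
  try omega

theorem pa0 (Z : Int) (h1 : 0 < Z) (h2 : Z ≤ 2) :
    get_shell_structure Z = [(1, Z - 0)] := by
  simp only [get_shell_structure, shellLoop, shellEdges, lk2,
    if_pos (show Z ≤ (2:Int) from h2),
    if_pos (show Z > 0 by omega),
    if_neg (show ¬ Z > 86 by omega)]
  norm_num
  try omega

theorem filt1 (Z : Int) (h1 : 2 < Z) (h2 : Z ≤ 10) :
    edgesB.filter (fun e => decide (e < Z)) = [(2:Int)] := by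
  simp only [edgesB, List.filter,
    show decide ((2:Int) < Z) = true by simp; omega,
    show decide ((10:Int) < Z) = false by simp; omega,
    show decide ((18:Int) < Z) = false by simp; omega,
    show decide ((28:Int) < Z) = false by simp; omega,
    show decide ((36:Int) < Z) = false by simp; omega,
    show decide ((48:Int) < Z) = false by simp; omega,
    show decide ((54:Int) < Z) = false by simp; omega,
    show decide ((70:Int) < Z) = false by simp; omega,
    show decide ((86:Int) < Z) = false by simp; omega]

theorem lbl1 (Z : Int) (h1 : 2 < Z) (h2 : Z ≤ 10) : labelB Z = 2 := by
  simp only [labelB, edgesB, nOfB, List.find?,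
    show decide (Z ≤ (2:Int)) = false by simp; omega,
    show decide (Z ≤ (10:Int)) = true by simp; omega]
  decide

theorem alt1 (Z : Int) (h1 : 2 < Z) (h2 : Z ≤ 10) :
    get_shell_structure_alt Z = [(1, 2), (2, Z - 2)] := by
  simp only [get_shell_structure_alt, filt1 Z h1 h2, if_neg (show ¬ Z ≤ 0 by omega),
    List.cons_append, List.nil_append, List.zip, List.zipWith, List.tail, List.map,
    lb2, lbl1 Z h1 h2]
  try norm_num
  try omega

theorem pa1 (Z : Int) (h1 : 2 < Z) (h2 : Z ≤ 10) :
    get_shell_structure Z = [(1, 2), (2, Z - 2)] := by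
  simp only [get_shell_structure, shellLoop, shellEdges, lk2, lk10,
    if_neg (show ¬ Z ≤ (2:Int) by omega),
    if_pos (show Z ≤ (10:Int) from h2),
    if_pos (show Z - (2 - 0) > 0 by omega),
    if_neg (show ¬ Z > 86 by omega)]
  norm_num
  try omega

theorem filt2 (Z : Int) (h1 : 10 < Z) (h2 : Z ≤ 18) :
    edgesB.filter (fun e => decide (e < Z)) = [(2:Int), (10:Int)] := by
  simp only [edgesB, List.filter,
    show decide ((2:Int) < Z) = true by simp; omega,
    show decide ((10:Int) < Z) = true by simp; omega,
    show decide ((18:Int) < Z) = false by simp; omega,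
    show decide ((28:Int) < Z) = false by simp; omega,
    show decide ((36:Int) < Z) = false by simp; omega,
    show decide ((48:Int) < Z) = false by simp; omega,
    show decide ((54:Int) < Z) = false by simp; omega,
    show decide ((70:Int) < Z) = false by simp; omega,
    show decide ((86:Int) < Z) = false by simp; omega]

theorem lbl2 (Z : Int) (h1 : 10 < Z) (h2 : Z ≤ 18) : labelB Z = 3 := by
  simp only [labelB, edgesB, nOfB, List.find?,
    show decide (Z ≤ (2:Int)) = false by simp; omega,
    show decide (Z ≤ (10:Int)) = false by simp; omega,
    show decide (Z ≤ (18:Int)) = true by simp; omega]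
  decide

theorem alt2 (Z : Int) (h1 : 10 < Z) (h2 : Z ≤ 18) :
    get_shell_structure_alt Z = [(1, 2), (2, 8), (3, Z - 10)] := by
  simp only [get_shell_structure_alt, filt2 Z h1 h2, if_neg (show ¬ Z ≤ 0 by omega),
    List.cons_append, List.nil_append, List.zip, List.zipWith, List.tail, List.map,
    lb2, lb10, lbl2 Z h1 h2]
  try norm_num
  try omega

theorem pa2 (Z : Int) (h1 : 10 < Z) (h2 : Z ≤ 18) :
    get_shell_structure Z = [(1, 2), (2, 8), (3, Z - 10)] := by
  simp only [get_shell_structure, shellLoop, shellEdges, lk2, lk10, lk18,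
    if_neg (show ¬ Z ≤ (2:Int) by omega),
    if_neg (show ¬ Z ≤ (10:Int) by omega),
    if_pos (show Z ≤ (18:Int) from h2),
    if_pos (show Z - (2 - 0) - (10 - 2) > 0 by omega),
    if_neg (show ¬ Z > 86 by omega)]
  norm_num
  try omega

theorem filt3 (Z : Int) (h1 : 18 < Z) (h2 : Z ≤ 28) :
    edgesB.filter (fun e => decide (e < Z)) = [(2:Int), (10:Int), (18:Int)] := by
  simp only [edgesB, List.filter,
    show decide ((2:Int) < Z) = true by simp; omega,
    show decide ((10:Int) < Z) = true by simp; omega,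
    show decide ((18:Int) < Z) = true by simp; omega,
    show decide ((28:Int) < Z) = false by simp; omega,
    show decide ((36:Int) < Z) = false by simp; omega,
    show decide ((48:Int) < Z) = false by simp; omega,
    show decide ((54:Int) < Z) = false by simp; omega,
    show decide ((70:Int) < Z) = false by simp; omega,
    show decide ((86:Int) < Z) = false by simp; omega]

theorem lbl3 (Z : Int) (h1 : 18 < Z) (h2 : Z ≤ 28) : labelB Z = 3 := by
  simp only [labelB, edgesB, nOfB, List.find?,
    show decide (Z ≤ (2:Int)) = false by simp; omega,
    show decide (Z ≤ (10:Int)) = false by simp; omega,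
    show decide (Z ≤ (18:Int)) = false by simp; omega,
    show decide (Z ≤ (28:Int)) = true by simp; omega]
  decide

theorem alt3 (Z : Int) (h1 : 18 < Z) (h2 : Z ≤ 28) :
    get_shell_structure_alt Z = [(1, 2), (2, 8), (3, 8), (3, Z - 18)] := by
  simp only [get_shell_structure_alt, filt3 Z h1 h2, if_neg (show ¬ Z ≤ 0 by omega),
    List.cons_append, List.nil_append, List.zip, List.zipWith, List.tail, List.map,
    lb2, lb10, lb18, lbl3 Z h1 h2]
  try norm_num
  try omega

theorem pa3 (Z : Int) (h1 : 18 < Z) (h2 : Z ≤ 28) :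
    get_shell_structure Z = [(1, 2), (2, 8), (3, 8), (3, Z - 18)] := by
  simp only [get_shell_structure, shellLoop, shellEdges, lk2, lk10, lk18, lk28,
    if_neg (show ¬ Z ≤ (2:Int) by omega),
    if_neg (show ¬ Z ≤ (10:Int) by omega),
    if_neg (show ¬ Z ≤ (18:Int) by omega),
    if_pos (show Z ≤ (28:Int) from h2),
    if_pos (show Z - (2 - 0) - (10 - 2) - (18 - 10) > 0 by omega),
    if_neg (show ¬ Z > 86 by omega)]
  norm_num
  try omega

theorem filt4 (Z : Int) (h1 : 28 < Z) (h2 : Z ≤ 36) :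
    edgesB.filter (fun e => decide (e < Z)) = [(2:Int), (10:Int), (18:Int), (28:Int)] := by
  simp only [edgesB, List.filter,
    show decide ((2:Int) < Z) = true by simp; omega,
    show decide ((10:Int) < Z) = true by simp; omega,
    show decide ((18:Int) < Z) = true by simp; omega,
    show decide ((28:Int) < Z) = true by simp; omega,
    show decide ((36:Int) < Z) = false by simp; omega,
    show decide ((48:Int) < Z) = false by simp; omega,
    show decide ((54:Int) < Z) = false by simp; omega,
    show decide ((70:Int) < Z) = false by simp; omega,
    show decide ((86:Int) < Z) = false by simp; omega]

theorem lbl4 (Z : Int) (h1 : 28 < Z) (h2 : Z ≤ 36) : labelB Z = 4 := by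
  simp only [labelB, edgesB, nOfB, List.find?,
    show decide (Z ≤ (2:Int)) = false by simp; omega,
    show decide (Z ≤ (10:Int)) = false by simp; omega,
    show decide (Z ≤ (18:Int)) = false by simp; omega,
    show decide (Z ≤ (28:Int)) = false by simp; omega,
    show decide (Z ≤ (36:Int)) = true by simp; omega]
  decide

theorem alt4 (Z : Int) (h1 : 28 < Z) (h2 : Z ≤ 36) :
    get_shell_structure_alt Z = [(1, 2), (2, 8), (3, 8), (3, 10), (4, Z - 28)] := by
  simp only [get_shell_structure_alt, filt4 Z h1 h2, if_neg (show ¬ Z ≤ 0 by omega),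
    List.cons_append, List.nil_append, List.zip, List.zipWith, List.tail, List.map,
    lb2, lb10, lb18, lb28, lbl4 Z h1 h2]
  try norm_num
  try omega

theorem pa4 (Z : Int) (h1 : 28 < Z) (h2 : Z ≤ 36) :
    get_shell_structure Z = [(1, 2), (2, 8), (3, 8), (3, 10), (4, Z - 28)] := by
  simp only [get_shell_structure, shellLoop, shellEdges, lk2, lk10, lk18, lk28, lk36,
    if_neg (show ¬ Z ≤ (2:Int) by omega),
    if_neg (show ¬ Z ≤ (10:Int) by omega),
    if_neg (show ¬ Z ≤ (18:Int) by omega),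
    if_neg (show ¬ Z ≤ (28:Int) by omega),
    if_pos (show Z ≤ (36:Int) from h2),
    if_pos (show Z - (2 - 0) - (10 - 2) - (18 - 10) - (28 - 18) > 0 by omega),
    if_neg (show ¬ Z > 86 by omega)]
  norm_num
  try omega

theorem filt5 (Z : Int) (h1 : 36 < Z) (h2 : Z ≤ 48) :
    edgesB.filter (fun e => decide (e < Z)) = [(2:Int), (10:Int), (18:Int), (28:Int), (36:Int)] := by
  simp only [edgesB, List.filter,
    show decide ((2:Int) < Z) = true by simp; omega,
    show decide ((10:Int) < Z) = true by simp; omega,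
    show decide ((18:Int) < Z) = true by simp; omega,
    show decide ((28:Int) < Z) = true by simp; omega,
    show decide ((36:Int) < Z) = true by simp; omega,
    show decide ((48:Int) < Z) = false by simp; omega,
    show decide ((54:Int) < Z) = false by simp; omega,
    show decide ((70:Int) < Z) = false by simp; omega,
    show decide ((86:Int) < Z) = false by simp; omega]

theorem lbl5 (Z : Int) (h1 : 36 < Z) (h2 : Z ≤ 48) : labelB Z = 4 := by
  simp only [labelB, edgesB, nOfB, List.find?,
    show decide (Z ≤ (2:Int)) = false by simp; omega,
    show decide (Z ≤ (10:Int)) = false by simp; omega,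
    show decide (Z ≤ (18:Int)) = false by simp; omega,
    show decide (Z ≤ (28:Int)) = false by simp; omega,
    show decide (Z ≤ (36:Int)) = false by simp; omega,
    show decide (Z ≤ (48:Int)) = true by simp; omega]
  decide

theorem alt5 (Z : Int) (h1 : 36 < Z) (h2 : Z ≤ 48) :
    get_shell_structure_alt Z = [(1, 2), (2, 8), (3, 8), (3, 10), (4, 8), (4, Z - 36)] := by
  simp only [get_shell_structure_alt, filt5 Z h1 h2, if_neg (show ¬ Z ≤ 0 by omega),
    List.cons_append, List.nil_append, List.zip, List.zipWith, List.tail, List.map,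
    lb2, lb10, lb18, lb28, lb36, lbl5 Z h1 h2]
  try norm_num
  try omega

theorem pa5 (Z : Int) (h1 : 36 < Z) (h2 : Z ≤ 48) :
    get_shell_structure Z = [(1, 2), (2, 8), (3, 8), (3, 10), (4, 8), (4, Z - 36)] := by
  simp only [get_shell_structure, shellLoop, shellEdges, lk2, lk10, lk18, lk28, lk36, lk48,
    if_neg (show ¬ Z ≤ (2:Int) by omega),
    if_neg (show ¬ Z ≤ (10:Int) by omega),
    if_neg (show ¬ Z ≤ (18:Int) by omega),
    if_neg (show ¬ Z ≤ (28:Int) by omega),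
    if_neg (show ¬ Z ≤ (36:Int) by omega),
    if_pos (show Z ≤ (48:Int) from h2),
    if_pos (show Z - (2 - 0) - (10 - 2) - (18 - 10) - (28 - 18) - (36 - 28) > 0 by omega),
    if_neg (show ¬ Z > 86 by omega)]
  norm_num
  try omega

theorem filt6 (Z : Int) (h1 : 48 < Z) (h2 : Z ≤ 54) :
    edgesB.filter (fun e => decide (e < Z)) = [(2:Int), (10:Int), (18:Int), (28:Int), (36:Int), (48:Int)] := by
  simp only [edgesB, List.filter,
    show decide ((2:Int) < Z) = true by simp; omega,
    show decide ((10:Int) < Z) = true by simp; omega,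
    show decide ((18:Int) < Z) = true by simp; omega,
    show decide ((28:Int) < Z) = true by simp; omega,
    show decide ((36:Int) < Z) = true by simp; omega,
    show decide ((48:Int) < Z) = true by simp; omega,
    show decide ((54:Int) < Z) = false by simp; omega,
    show decide ((70:Int) < Z) = false by simp; omega,
    show decide ((86:Int) < Z) = false by simp; omega]

theorem lbl6 (Z : Int) (h1 : 48 < Z) (h2 : Z ≤ 54) : labelB Z = 5 := by
  simp only [labelB, edgesB, nOfB, List.find?,
    show decide (Z ≤ (2:Int)) = false by simp; omega,
    show decide (Z ≤ (10:Int)) = false by simp; omega,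
    show decide (Z ≤ (18:Int)) = false by simp; omega,
    show decide (Z ≤ (28:Int)) = false by simp; omega,
    show decide (Z ≤ (36:Int)) = false by simp; omega,
    show decide (Z ≤ (48:Int)) = false by simp; omega,
    show decide (Z ≤ (54:Int)) = true by simp; omega]
  decide

theorem alt6 (Z : Int) (h1 : 48 < Z) (h2 : Z ≤ 54) :
    get_shell_structure_alt Z = [(1, 2), (2, 8), (3, 8), (3, 10), (4, 8), (4, 12), (5, Z - 48)] := by
  simp only [get_shell_structure_alt, filt6 Z h1 h2, if_neg (show ¬ Z ≤ 0 by omega),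
    List.cons_append, List.nil_append, List.zip, List.zipWith, List.tail, List.map,
    lb2, lb10, lb18, lb28, lb36, lb48, lbl6 Z h1 h2]
  try norm_num
  try omega

theorem pa6 (Z : Int) (h1 : 48 < Z) (h2 : Z ≤ 54) :
    get_shell_structure Z = [(1, 2), (2, 8), (3, 8), (3, 10), (4, 8), (4, 12), (5, Z - 48)] := by
  simp only [get_shell_structure, shellLoop, shellEdges, lk2, lk10, lk18, lk28, lk36, lk48, lk54,
    if_neg (show ¬ Z ≤ (2:Int) by omega),
    if_neg (show ¬ Z ≤ (10:Int) by omega),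
    if_neg (show ¬ Z ≤ (18:Int) by omega),
    if_neg (show ¬ Z ≤ (28:Int) by omega),
    if_neg (show ¬ Z ≤ (36:Int) by omega),
    if_neg (show ¬ Z ≤ (48:Int) by omega),
    if_pos (show Z ≤ (54:Int) from h2),
    if_pos (show Z - (2 - 0) - (10 - 2) - (18 - 10) - (28 - 18) - (36 - 28) - (48 - 36) > 0 by omega),
    if_neg (show ¬ Z > 86 by omega)]
  norm_num
  try omega

theorem filt7 (Z : Int) (h1 : 54 < Z) (h2 : Z ≤ 70) :
    edgesB.filter (fun e => decide (e < Z)) = [(2:Int), (10:Int), (18:Int), (28:Int), (36:Int), (48:Int), (54:Int)] := by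
  simp only [edgesB, List.filter,
    show decide ((2:Int) < Z) = true by simp; omega,
    show decide ((10:Int) < Z) = true by simp; omega,
    show decide ((18:Int) < Z) = true by simp; omega,
    show decide ((28:Int) < Z) = true by simp; omega,
    show decide ((36:Int) < Z) = true by simp; omega,
    show decide ((48:Int) < Z) = true by simp; omega,
    show decide ((54:Int) < Z) = true by simp; omega,
    show decide ((70:Int) < Z) = false by simp; omega,
    show decide ((86:Int) < Z) = false by simp; omega]

theorem lbl7 (Z : Int) (h1 : 54 < Z) (h2 : Z ≤ 70) : labelB Z = 5 := by
  simp only [labelB, edgesB, nOfB, List.find?,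
    show decide (Z ≤ (2:Int)) = false by simp; omega,
    show decide (Z ≤ (10:Int)) = false by simp; omega,
    show decide (Z ≤ (18:Int)) = false by simp; omega,
    show decide (Z ≤ (28:Int)) = false by simp; omega,
    show decide (Z ≤ (36:Int)) = false by simp; omega,
    show decide (Z ≤ (48:Int)) = false by simp; omega,
    show decide (Z ≤ (54:Int)) = false by simp; omega,
    show decide (Z ≤ (70:Int)) = true by simp; omega]
  decide

theorem alt7 (Z : Int) (h1 : 54 < Z) (h2 : Z ≤ 70) :
    get_shell_structure_alt Z = [(1, 2), (2, 8), (3, 8), (3, 10), (4, 8), (4, 12), (5, 6), (5, Z - 54)] := by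
  simp only [get_shell_structure_alt, filt7 Z h1 h2, if_neg (show ¬ Z ≤ 0 by omega),
    List.cons_append, List.nil_append, List.zip, List.zipWith, List.tail, List.map,
    lb2, lb10, lb18, lb28, lb36, lb48, lb54, lbl7 Z h1 h2]
  try norm_num
  try omega

theorem pa7 (Z : Int) (h1 : 54 < Z) (h2 : Z ≤ 70) :
    get_shell_structure Z = [(1, 2), (2, 8), (3, 8), (3, 10), (4, 8), (4, 12), (5, 6), (5, Z - 54)] := by
  simp only [get_shell_structure, shellLoop, shellEdges, lk2, lk10, lk18, lk28, lk36, lk48, lk54, lk70,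
    if_neg (show ¬ Z ≤ (2:Int) by omega),
    if_neg (show ¬ Z ≤ (10:Int) by omega),
    if_neg (show ¬ Z ≤ (18:Int) by omega),
    if_neg (show ¬ Z ≤ (28:Int) by omega),
    if_neg (show ¬ Z ≤ (36:Int) by omega),
    if_neg (show ¬ Z ≤ (48:Int) by omega),
    if_neg (show ¬ Z ≤ (54:Int) by omega),
    if_pos (show Z ≤ (70:Int) from h2),
    if_pos (show Z - (2 - 0) - (10 - 2) - (18 - 10) - (28 - 18) - (36 - 28) - (48 - 36) - (54 - 48) > 0 by omega),
    if_neg (show ¬ Z > 86 by omega)]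
  norm_num
  try omega

theorem filt8 (Z : Int) (h1 : 70 < Z) (h2 : Z ≤ 86) :
    edgesB.filter (fun e => decide (e < Z)) = [(2:Int), (10:Int), (18:Int), (28:Int), (36:Int), (48:Int), (54:Int), (70:Int)] := by
  simp only [edgesB, List.filter,
    show decide ((2:Int) < Z) = true by simp; omega,
    show decide ((10:Int) < Z) = true by simp; omega,
    show decide ((18:Int) < Z) = true by simp; omega,
    show decide ((28:Int) < Z) = true by simp; omega,
    show decide ((36:Int) < Z) = true by simp; omega,
    show decide ((48:Int) < Z) = true by simp; omega,
    show decide ((54:Int) < Z) = true by simp; omega,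
    show decide ((70:Int) < Z) = true by simp; omega,
    show decide ((86:Int) < Z) = false by simp; omega]

theorem lbl8 (Z : Int) (h1 : 70 < Z) (h2 : Z ≤ 86) : labelB Z = 6 := by
  simp only [labelB, edgesB, nOfB, List.find?,
    show decide (Z ≤ (2:Int)) = false by simp; omega,
    show decide (Z ≤ (10:Int)) = false by simp; omega,
    show decide (Z ≤ (18:Int)) = false by simp; omega,
    show decide (Z ≤ (28:Int)) = false by simp; omega,
    show decide (Z ≤ (36:Int)) = false by simp; omega,
    show decide (Z ≤ (48:Int)) = false by simp; omega,
    show decide (Z ≤ (54:Int)) = false by simp; omega,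
    show decide (Z ≤ (70:Int)) = false by simp; omega,
    show decide (Z ≤ (86:Int)) = true by simp; omega]
  decide

theorem alt8 (Z : Int) (h1 : 70 < Z) (h2 : Z ≤ 86) :
    get_shell_structure_alt Z = [(1, 2), (2, 8), (3, 8), (3, 10), (4, 8), (4, 12), (5, 6), (5, 16), (6, Z - 70)] := by
  simp only [get_shell_structure_alt, filt8 Z h1 h2, if_neg (show ¬ Z ≤ 0 by omega),
    List.cons_append, List.nil_append, List.zip, List.zipWith, List.tail, List.map,
    lb2, lb10, lb18, lb28, lb36, lb48, lb54, lb70, lbl8 Z h1 h2]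
  try norm_num
  try omega

theorem pa8 (Z : Int) (h1 : 70 < Z) (h2 : Z ≤ 86) :
    get_shell_structure Z = [(1, 2), (2, 8), (3, 8), (3, 10), (4, 8), (4, 12), (5, 6), (5, 16), (6, Z - 70)] := by
  simp only [get_shell_structure, shellLoop, shellEdges, lk2, lk10, lk18, lk28, lk36, lk48, lk54, lk70, lk86,
    if_neg (show ¬ Z ≤ (2:Int) by omega),
    if_neg (show ¬ Z ≤ (10:Int) by omega),
    if_neg (show ¬ Z ≤ (18:Int) by omega),
    if_neg (show ¬ Z ≤ (28:Int) by omega),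
    if_neg (show ¬ Z ≤ (36:Int) by omega),
    if_neg (show ¬ Z ≤ (48:Int) by omega),
    if_neg (show ¬ Z ≤ (54:Int) by omega),
    if_neg (show ¬ Z ≤ (70:Int) by omega),
    if_pos (show Z ≤ (86:Int) from h2),
    if_pos (show Z - (2 - 0) - (10 - 2) - (18 - 10) - (28 - 18) - (36 - 28) - (48 - 36) - (54 - 48) - (70 - 54) > 0 by omega),
    if_neg (show ¬ Z > 86 by omega)]
  norm_num
  try omega

theorem pa_neg (Z : Int) (h : Z ≤ 0) : get_shell_structure Z = [] := by
  simp only [get_shell_structure, shellLoop, shellEdges,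
    if_pos (show Z ≤ (2:Int) by omega), if_neg (show ¬ Z > 0 by omega),
    if_neg (show ¬ Z > 86 by omega)]

theorem alt_neg (Z : Int) (h : Z ≤ 0) : get_shell_structure_alt Z = [] := by
  simp only [get_shell_structure_alt, if_pos h]

theorem pa_hi (Z : Int) (h : 86 < Z) : get_shell_structure Z = [(1, 2), (2, 8), (3, 8), (3, 10), (4, 8), (4, 12), (5, 6), (5, 16), (6, 16), (7, Z - 86)] := by
  simp only [get_shell_structure, shellLoop, shellEdges, lk2, lk10, lk18, lk28, lk36, lk48, lk54, lk70, lk86,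
    if_neg (show ¬ Z ≤ (2:Int) by omega),
    if_neg (show ¬ Z ≤ (10:Int) by omega),
    if_neg (show ¬ Z ≤ (18:Int) by omega),
    if_neg (show ¬ Z ≤ (28:Int) by omega),
    if_neg (show ¬ Z ≤ (36:Int) by omega),
    if_neg (show ¬ Z ≤ (48:Int) by omega),
    if_neg (show ¬ Z ≤ (54:Int) by omega),
    if_neg (show ¬ Z ≤ (70:Int) by omega),
    if_neg (show ¬ Z ≤ (86:Int) by omega),
    if_pos (show Z > 86 by omega)]
  norm_num
  try omega

theorem filt_hi (Z : Int) (h : 86 < Z) :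
    edgesB.filter (fun e => decide (e < Z)) = [(2:Int), (10:Int), (18:Int), (28:Int), (36:Int), (48:Int), (54:Int), (70:Int), (86:Int)] := by
  simp only [edgesB, List.filter,
    show decide ((2:Int) < Z) = true by simp; omega,
    show decide ((10:Int) < Z) = true by simp; omega,
    show decide ((18:Int) < Z) = true by simp; omega,
    show decide ((28:Int) < Z) = true by simp; omega,
    show decide ((36:Int) < Z) = true by simp; omega,
    show decide ((48:Int) < Z) = true by simp; omega,
    show decide ((54:Int) < Z) = true by simp; omega,
    show decide ((70:Int) < Z) = true by simp; omega,
    show decide ((86:Int) < Z) = true by simp; omega]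

theorem lbl_hi (Z : Int) (h : 86 < Z) : labelB Z = 7 := by
  simp only [labelB, edgesB, List.find?,
    show decide (Z ≤ (2:Int)) = false by simp; omega,
    show decide (Z ≤ (10:Int)) = false by simp; omega,
    show decide (Z ≤ (18:Int)) = false by simp; omega,
    show decide (Z ≤ (28:Int)) = false by simp; omega,
    show decide (Z ≤ (36:Int)) = false by simp; omega,
    show decide (Z ≤ (48:Int)) = false by simp; omega,
    show decide (Z ≤ (54:Int)) = false by simp; omega,
    show decide (Z ≤ (70:Int)) = false by simp; omega,
    show decide (Z ≤ (86:Int)) = false by simp; omega]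

theorem alt_hi (Z : Int) (h : 86 < Z) :
    get_shell_structure_alt Z = [(1, 2), (2, 8), (3, 8), (3, 10), (4, 8), (4, 12), (5, 6), (5, 16), (6, 16), (7, Z - 86)] := by
  simp only [get_shell_structure_alt, filt_hi Z h, if_neg (show ¬ Z ≤ 0 by omega),
    List.cons_append, List.nil_append, List.zip, List.zipWith, List.tail, List.map,
    lb2, lb10, lb18, lb28, lb36, lb48, lb54, lb70, lb86, lbl_hi Z h]
  try norm_num
  try omega

theorem portsEq (Z : Int) : get_shell_structure Z = get_shell_structure_alt Z := by
  by_cases h0 : Z ≤ 0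
  · rw [pa_neg Z h0, alt_neg Z h0]
  by_cases h1 : Z ≤ 2
  · rw [pa0 Z (by omega) h1, alt0 Z (by omega) h1]
  by_cases h2 : Z ≤ 10
  · rw [pa1 Z (by omega) h2, alt1 Z (by omega) h2]
  by_cases h3 : Z ≤ 18
  · rw [pa2 Z (by omega) h3, alt2 Z (by omega) h3]
  by_cases h4 : Z ≤ 28
  · rw [pa3 Z (by omega) h4, alt3 Z (by omega) h4]
  by_cases h5 : Z ≤ 36
  · rw [pa4 Z (by omega) h5, alt4 Z (by omega) h5]
  by_cases h6 : Z ≤ 48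
  · rw [pa5 Z (by omega) h6, alt5 Z (by omega) h6]
  by_cases h7 : Z ≤ 54
  · rw [pa6 Z (by omega) h7, alt6 Z (by omega) h7]
  by_cases h8 : Z ≤ 70
  · rw [pa7 Z (by omega) h8, alt7 Z (by omega) h8]
  by_cases h9 : Z ≤ 86
  · rw [pa8 Z (by omega) h9, alt8 Z (by omega) h9]
  rw [pa_hi Z (by omega), alt_hi Z (by omega)]

-- ===== VERDICT (by name: the statement is the Claim_ definition above) =====
theorem get_shell_structure_spec : Claim_equal_get_shell_structure := by
  intro Z _
  exact portsEq Z
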